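-- pv_equiv track=rewrite | github.com/RajdeepDas43/daitalabs-assignment---Rajdeep | rag_pipeline.py | _find_recipient_by_sender_topic
-- ===== SOURCE A (Python) =====
-- def _find_recipient_by_sender_topic(sender: str, topic: str, retrieved: list) -> str:
--     """Find who received an email from a specific sender about a topic."""
--     sender_lower = sender.lower()
--     topic_lower = topic.lower()
--     for email, chunk, score in retrieved:
--         from_name = email.get('from_name', '').lower()
--         subject = email.get('subject', '').lower()
--         if sender_lower in from_name and _topic_matches(topic_lower, subject):
--             return f"{sender} sent the {email['subject'].lower()} email to {email['to_name']}."
--     # Relax: just match sender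
--     for email, chunk, score in retrieved:
--         from_name = email.get('from_name', '').lower()
--         if sender_lower in from_name:
--             return f"{sender} sent the {email['subject'].lower()} email to {email['to_name']}."
--     return f"I could not find who {sender} sent a {topic} email to in the available emails."
--
-- def _topic_matches(topic: str, subject: str) -> bool:
--     """Check if a topic description matches a subject line."""
--     topic = topic.lower().strip()
--     subject = subject.lower().strip()
--
--     # Direct containment
--     if topic in subject or subject in topic:
--         return True
--
--     # Keyword overlap
--     topic_words = set(topic.split()) - {'a', 'an', 'the', 'email', 'request', 'to', 'from'}
--     subject_words = set(subject.split())
--     if topic_words & subject_words: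
--         return True
--
--     return False
-- ===== SOURCE B (Python) =====
-- def _find_recipient_by_sender_topic(sender: str, topic: str, retrieved: list) -> str:
--     """Single pass: return on the first full (sender+topic) match, remembering
--     the first sender-only match as a fallback."""
--     sender_lower = sender.lower()
--     topic_lower = topic.lower()
--     fallback = None
--     for email, chunk, score in retrieved:
--         if sender_lower in email.get('from_name', '').lower():
--             if _topic_matches(topic_lower, email.get('subject', '').lower()):
--                 return f"{sender} sent the {email['subject'].lower()} email to {email['to_name']}."
--             if fallback is None:
--                 fallback = email
--     if fallback is not None:
--         return f"{sender} sent the {fallback['subject'].lower()} email to {fallback['to_name']}."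
--     return f"I could not find who {sender} sent a {topic} email to in the available emails."
--
--
-- def _topic_matches(topic: str, subject: str) -> bool:
--     t = topic.lower().strip()
--     s = subject.lower().strip()
--     if t in s or s in t:
--         return True
--     stop = {'a', 'an', 'the', 'email', 'request', 'to', 'from'}
--     subject_words = set(s.split())
--     return any(w in subject_words for w in t.split() if w not in stop)
-- ===== Notes on version B (the rewrite author's own statement) =====
-- stated objective: simpler
-- what changed: A's two sequential scans over retrieved (full sender+topic match, then a relaxed sender-only rescan) are replaced by a single pass that returns on the first full match and remembers the first sender-only match as a fallback; the keyword-overlap test is an any() over topic words instead of building the set intersection.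
import Mathlib
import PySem

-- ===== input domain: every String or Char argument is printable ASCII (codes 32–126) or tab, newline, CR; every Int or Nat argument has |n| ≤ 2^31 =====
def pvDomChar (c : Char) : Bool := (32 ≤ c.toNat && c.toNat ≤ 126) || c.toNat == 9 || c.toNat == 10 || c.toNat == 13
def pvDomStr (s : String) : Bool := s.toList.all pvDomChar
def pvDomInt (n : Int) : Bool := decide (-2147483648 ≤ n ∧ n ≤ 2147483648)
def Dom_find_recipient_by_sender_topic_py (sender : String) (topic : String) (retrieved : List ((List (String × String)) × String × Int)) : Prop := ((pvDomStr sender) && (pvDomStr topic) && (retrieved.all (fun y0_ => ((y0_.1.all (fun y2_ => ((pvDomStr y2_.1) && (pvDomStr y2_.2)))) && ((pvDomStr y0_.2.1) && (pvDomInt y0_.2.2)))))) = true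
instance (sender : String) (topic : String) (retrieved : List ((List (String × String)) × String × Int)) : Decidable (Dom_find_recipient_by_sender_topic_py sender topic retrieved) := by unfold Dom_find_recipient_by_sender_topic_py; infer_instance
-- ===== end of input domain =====

-- B replaces A's two sequential scans by one pass with a first-sender-match fallback (objective: simpler).
-- Equivalence is about the RETURN value; inputs on which Python raises KeyError are excluded by Pre_.

-- shared helpers (these mirror lines of the Python sources; both Pythons contain them verbatim)
def emailGetD (email : List (String × String)) (k : String) : String :=
  (PySem.Dict.ofList email).getD k ""

def fmtMsg (sender : String) (email : List (String × String)) : String :=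
  sender ++ " sent the " ++ PySem.Str.lower (emailGetD email "subject") ++ " email to "
    ++ emailGetD email "to_name" ++ "."
  -- exact on Pre_: Python indexes email['subject'] / email['to_name'] and raises KeyError when absent;
  -- Pre_ guarantees both keys are present on the email this is applied to.

def notFoundMsg (sender : String) (topic : String) : String :=
  "I could not find who " ++ sender ++ " sent a " ++ topic ++ " email to in the available emails."

-- ===== PORT A =====
def topic_matches_py (topic subject : String) : Bool :=
  let t := PySem.Str.strip (PySem.Str.lower topic)
  let s := PySem.Str.strip (PySem.Str.lower subject)
  if PySem.Str.isIn t s || PySem.Str.isIn s t then true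
  else
    let topic_words := PySem.Set.diff (PySem.Set.ofList (PySem.Str.split₀ t))
      (PySem.Set.ofList ["a", "an", "the", "email", "request", "to", "from"])
    let subject_words := PySem.Set.ofList (PySem.Str.split₀ s)
    if !(PySem.Set.inter topic_words subject_words).isEmpty then true
    else false

def aLoop1 (sender sender_lower topic_lower : String) :
    List ((List (String × String)) × String × Int) → Option String
  | [] => none
  | (email, _chunk, _score) :: rest =>
    let from_name := PySem.Str.lower (emailGetD email "from_name")
    let subject := PySem.Str.lower (emailGetD email "subject")
    if PySem.Str.isIn sender_lower from_name && topic_matches_py topic_lower subject then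
      some (fmtMsg sender email)
    else aLoop1 sender sender_lower topic_lower rest

def aLoop2 (sender sender_lower : String) :
    List ((List (String × String)) × String × Int) → Option String
  | [] => none
  | (email, _chunk, _score) :: rest =>
    let from_name := PySem.Str.lower (emailGetD email "from_name")
    if PySem.Str.isIn sender_lower from_name then some (fmtMsg sender email)
    else aLoop2 sender sender_lower rest

def find_recipient_by_sender_topic_py (sender : String) (topic : String) (retrieved : List ((List (String × String)) × String × Int)) : String :=
  let sender_lower := PySem.Str.lower sender
  let topic_lower := PySem.Str.lower topic
  match aLoop1 sender sender_lower topic_lower retrieved with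
  | some r => r
  | none =>
    match aLoop2 sender sender_lower retrieved with
    | some r => r
    | none => notFoundMsg sender topic

-- ===== PORT B =====
def topic_matches_alt (topic subject : String) : Bool :=
  let t := PySem.Str.strip (PySem.Str.lower topic)
  let s := PySem.Str.strip (PySem.Str.lower subject)
  if PySem.Str.isIn t s || PySem.Str.isIn s t then true
  else
    let subject_words := PySem.Set.ofList (PySem.Str.split₀ s)
    (PySem.Str.split₀ t).any (fun w =>
      !(PySem.Set.contains (PySem.Set.ofList ["a", "an", "the", "email", "request", "to", "from"]) w)
        && PySem.Set.contains subject_words w)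

def bLoop (sender topic sender_lower topic_lower : String)
    (fallback : Option (List (String × String))) :
    List ((List (String × String)) × String × Int) → String
  | [] =>
    match fallback with
    | some email => fmtMsg sender email
    | none => notFoundMsg sender topic
  | (email, _chunk, _score) :: rest =>
    if PySem.Str.isIn sender_lower (PySem.Str.lower (emailGetD email "from_name")) then
      if topic_matches_alt topic_lower (PySem.Str.lower (emailGetD email "subject")) then
        fmtMsg sender email
      else bLoop sender topic sender_lower topic_lower
        (if fallback.isNone then some email else fallback) rest
    else bLoop sender topic sender_lower topic_lower fallback rest

def find_recipient_by_sender_topic_py_alt (sender : String) (topic : String) (retrieved : List ((List (String × String)) × String × Int)) : String :=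
  bLoop sender topic (PySem.Str.lower sender) (PySem.Str.lower topic) none retrieved

-- ===== PRECONDITION & SPEC =====
def hasKeys (email : List (String × String)) : Bool :=
  (PySem.Dict.ofList email).contains "subject" && (PySem.Dict.ofList email).contains "to_name"

-- Pre_ excludes exactly the inputs on which Python A (and B) raise KeyError: the email whose
-- formatted answer would be returned (first full sender+topic match, else first sender-only match)
-- must carry both the 'subject' and 'to_name' keys.
def Pre_find_recipient_by_sender_topic_py (sender : String) (topic : String) (retrieved : List ((List (String × String)) × String × Int)) : Prop :=
  (match retrieved.find? (fun p =>
      PySem.Str.isIn (PySem.Str.lower sender) (PySem.Str.lower (emailGetD p.1 "from_name"))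
        && topic_matches_py (PySem.Str.lower topic) (PySem.Str.lower (emailGetD p.1 "subject"))) with
   | some p => hasKeys p.1
   | none =>
     match retrieved.find? (fun p =>
        PySem.Str.isIn (PySem.Str.lower sender) (PySem.Str.lower (emailGetD p.1 "from_name"))) with
     | some p => hasKeys p.1
     | none => true) = true
instance (sender : String) (topic : String) (retrieved : List ((List (String × String)) × String × Int)) : Decidable (Pre_find_recipient_by_sender_topic_py sender topic retrieved) := by unfold Pre_find_recipient_by_sender_topic_py; infer_instance

def pvWitness_find_recipient_by_sender_topic_py : String × String × (List ((List (String × String)) × String × Int)) :=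
  ("Alice", "budget",
   [([("from_name", "Alice Smith"), ("subject", "Budget report"), ("to_name", "Bob")], "chunk", 1)])

def Spec_find_recipient_by_sender_topic_py (sender : String) (topic : String) (retrieved : List ((List (String × String)) × String × Int)) (out : String) : Prop := out = find_recipient_by_sender_topic_py_alt sender topic retrieved
instance (sender : String) (topic : String) (retrieved : List ((List (String × String)) × String × Int)) (out : String) : Decidable (Spec_find_recipient_by_sender_topic_py sender topic retrieved out) := by unfold Spec_find_recipient_by_sender_topic_py; infer_instance

-- ===== CLAIM (what is proved, stated in full; the proofs are below) =====
def Claim_equal_find_recipient_by_sender_topic_py : Prop := ∀ (sender : String) (topic : String) (retrieved : List ((List (String × String)) × String × Int)), Dom_find_recipient_by_sender_topic_py sender topic retrieved → Pre_find_recipient_by_sender_topic_py sender topic retrieved → Spec_find_recipient_by_sender_topic_py sender topic retrieved (find_recipient_by_sender_topic_py sender topic retrieved)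

-- ===== LEMMAS AND PROOFS =====

-- the two keyword-overlap formulations agree: the set intersection is nonempty iff some
-- topic word outside the stopword set occurs among the subject words
theorem topic_matches_alt_eq (topic subject : String) :
    topic_matches_alt topic subject = topic_matches_py topic subject := by
  simp only [topic_matches_alt, topic_matches_py]
  set t := PySem.Str.strip (PySem.Str.lower topic) with ht
  set s := PySem.Str.strip (PySem.Str.lower subject) with hs
  by_cases h : (PySem.Str.isIn t s || PySem.Str.isIn s t) = true
  · rw [if_pos h, if_pos h]
  · rw [if_neg h, if_neg h]
    have key : ((PySem.Str.split₀ t).any (fun w =>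
        !(PySem.Set.contains (PySem.Set.ofList ["a", "an", "the", "email", "request", "to", "from"]) w)
          && PySem.Set.contains (PySem.Set.ofList (PySem.Str.split₀ s)) w) = true)
        ↔ ((PySem.Set.inter
            (PySem.Set.diff (PySem.Set.ofList (PySem.Str.split₀ t))
              (PySem.Set.ofList ["a", "an", "the", "email", "request", "to", "from"]))
            (PySem.Set.ofList (PySem.Str.split₀ s))).isEmpty = false) := by
      rw [List.any_eq_true, List.isEmpty_eq_false_iff]
      constructor
      · rintro ⟨w, hw, hpw⟩
        rw [Bool.and_eq_true, Bool.not_eq_true'] at hpw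
        obtain ⟨hstop, hsw⟩ := hpw
        refine List.ne_nil_of_mem (a := w) ?_
        rw [PySem.Set.mem_inter, PySem.Set.mem_diff]
        refine ⟨⟨(PySem.Set.mem_ofList _ _).mpr hw, fun hc => ?_⟩, (PySem.Set.contains_iff _ _).mp hsw⟩
        rw [(PySem.Set.contains_iff _ _).mpr hc] at hstop
        exact Bool.true_eq_false.mp hstop
      · intro hne
        obtain ⟨w, hw⟩ := List.exists_mem_of_ne_nil _ hne
        rw [PySem.Set.mem_inter, PySem.Set.mem_diff] at hw
        obtain ⟨⟨hwt, hwstop⟩, hws⟩ := hw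
        refine ⟨w, (PySem.Set.mem_ofList _ _).mp hwt, ?_⟩
        rw [Bool.and_eq_true, Bool.not_eq_true']
        refine ⟨?_, (PySem.Set.contains_iff _ _).mpr hws⟩
        cases hc : PySem.Set.contains (PySem.Set.ofList ["a", "an", "the", "email", "request", "to", "from"]) w
        · rfl
        · exact absurd ((PySem.Set.contains_iff _ _).mp hc) hwstop
    cases hI : (PySem.Set.inter
        (PySem.Set.diff (PySem.Set.ofList (PySem.Str.split₀ t))
          (PySem.Set.ofList ["a", "an", "the", "email", "request", "to", "from"]))
        (PySem.Set.ofList (PySem.Str.split₀ s))).isEmpty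
    · rw [key.mpr hI]; rfl
    · cases hL : ((PySem.Str.split₀ t).any (fun w =>
          !(PySem.Set.contains (PySem.Set.ofList ["a", "an", "the", "email", "request", "to", "from"]) w)
            && PySem.Set.contains (PySem.Set.ofList (PySem.Str.split₀ s)) w))
      · rfl
      · exact absurd ((key.mp hL).symm.trans hI) (by decide)

-- loop invariant: one pass with fallback = scan 1, then the recorded/remaining scan 2
theorem bLoop_eq (sender topic sl tl : String)
    (l : List ((List (String × String)) × String × Int))
    (fb : Option (List (String × String))) :
    bLoop sender topic sl tl fb l =
      match aLoop1 sender sl tl l with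
      | some r => r
      | none =>
        match fb with
        | some email => fmtMsg sender email
        | none =>
          match aLoop2 sender sl l with
          | some r => r
          | none => notFoundMsg sender topic := by
  induction l generalizing fb with
  | nil => cases fb <;> simp [bLoop, aLoop1, aLoop2]
  | cons hd rest ih =>
    obtain ⟨email, chunk, score⟩ := hd
    by_cases h1 : PySem.Str.isIn sl (PySem.Str.lower (emailGetD email "from_name")) = true
    · by_cases h2 : topic_matches_py tl (PySem.Str.lower (emailGetD email "subject")) = true
      · simp only [bLoop, aLoop1, topic_matches_alt_eq, h1, h2, Bool.and_self, if_true]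
      · rw [Bool.not_eq_true] at h2
        cases fb <;>
          simp only [bLoop, aLoop1, aLoop2, topic_matches_alt_eq, h1, h2, Bool.and_false,
            Bool.false_eq_true, if_false, eq_self_iff_true, if_true, Option.isNone_none,
            Option.isNone_some, ih]
    · rw [Bool.not_eq_true] at h1
      simp only [bLoop, aLoop1, aLoop2, topic_matches_alt_eq, h1, Bool.false_and,
        Bool.false_eq_true, if_false, ih]

-- ===== VERDICT (by name: the statement is the Claim_ definition above) =====
theorem find_recipient_by_sender_topic_py_spec : Claim_equal_find_recipient_by_sender_topic_py := by
  intro sender topic retrieved _ _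
  unfold Spec_find_recipient_by_sender_topic_py
  unfold find_recipient_by_sender_topic_py find_recipient_by_sender_topic_py_alt
  rw [bLoop_eq]
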